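-- pv_equiv track=rewrite | github.com/rosawoo/code-smell | detector/smell_detector.py | collect_methods
-- ===== SOURCE A (Python) =====
-- from typing import List, Dict, Tuple, Optional
--
-- def is_method(contents: List[str], index: int) -> bool:
--     line = contents[index].lstrip()
--     return line.startswith("def ")
--
-- def collect_methods(contents: List[str]) -> List[List[str]]:
--     all_methods, current = [], []
--     for index in range(len(contents)):
--         if is_method(contents, index):
--             if current:
--                 all_methods.append(current)
--             current = [contents[index]]
--         elif current:
--             current.append(contents[index])
--     if current:
--         all_methods.append(current)
--     return all_methods
-- ===== SOURCE B (Python) =====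
-- def collect_methods(contents):
--     starts = [i for i, line in enumerate(contents) if line.lstrip().startswith("def ")]
--     ends = starts[1:] + [len(contents)]
--     return [contents[lo:hi] for lo, hi in zip(starts, ends)]
-- ===== Notes on version B (the rewrite author's own statement) =====
-- stated objective: alternative
-- what changed: Replaces the single accumulator loop (growing a current block line by line) with two passes: first collect the indices of all 'def' lines, then slice the input between consecutive indices.
import Mathlib
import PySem

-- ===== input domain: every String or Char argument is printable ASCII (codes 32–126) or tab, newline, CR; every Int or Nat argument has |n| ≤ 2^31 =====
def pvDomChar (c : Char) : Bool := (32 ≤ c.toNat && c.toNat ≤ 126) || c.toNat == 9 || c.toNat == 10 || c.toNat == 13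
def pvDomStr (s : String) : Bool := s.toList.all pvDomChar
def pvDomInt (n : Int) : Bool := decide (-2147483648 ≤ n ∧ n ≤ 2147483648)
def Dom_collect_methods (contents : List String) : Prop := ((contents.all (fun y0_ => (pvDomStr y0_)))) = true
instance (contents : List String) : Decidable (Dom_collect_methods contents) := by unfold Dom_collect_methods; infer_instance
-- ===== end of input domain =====

-- B replaces A's single accumulator loop by an index-collection pass followed by a slicing pass
-- (alternative decomposition, same cost); return values proved equal on all inputs.

-- ===== PORT A =====
-- shared helper: line.lstrip().startswith("def ")
def isDefLine (line : String) : Bool :=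
  PySem.Str.startswith (PySem.Str.lstrip line) "def "

-- loop body of A: the three branches in Python's order, on state (all_methods, current)
def stepA (acc : List (List String) × List String) (line : String) :
    List (List String) × List String :=
  if isDefLine line then
    ((if acc.2.isEmpty then acc.1 else acc.1 ++ [acc.2]), [line])
  else if acc.2.isEmpty then acc
  else (acc.1, acc.2 ++ [line])

-- 'for index in range(len(contents))' with 'contents[index]'; the loop only reads
-- in-range indices, so pyGetD with default "" is exact here.
def collect_methods (contents : List String) : List (List String) :=
  let st := (PySem.List.pyRange 0 (PySem.List.len contents) 1).foldl
      (fun acc index => stepA acc (PySem.List.pyGetD contents index "")) ([], [])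
  if st.2.isEmpty then st.1 else st.1 ++ [st.2]

-- ===== PORT B =====
-- pass 1: indices of all 'def' lines; pass 2: slice between consecutive indices.
def collect_methods_alt (contents : List String) : List (List String) :=
  let starts : List Int :=
    ((PySem.List.enumerate contents).filter (fun p => isDefLine p.2)).map (fun p => p.1)
  let ends : List Int := starts.drop 1 ++ [PySem.List.len contents]
  (starts.zip ends).map (fun p => PySem.List.slice contents (some p.1) (some p.2))

-- ===== PRECONDITION & SPEC =====
def Spec_collect_methods (contents : List String) (out : List (List String)) : Prop := out = collect_methods_alt contents
instance (contents : List String) (out : List (List String)) : Decidable (Spec_collect_methods contents out) := by unfold Spec_collect_methods; infer_instance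

-- ===== CLAIM (what is proved, stated in full; the proofs are below) =====
def Claim_equal_collect_methods : Prop := ∀ (contents : List String), Dom_collect_methods contents → Spec_collect_methods contents (collect_methods contents)

-- ===== LEMMAS AND PROOFS =====

-- common specification: the blocks, one per 'def' line, lines before the first dropped
def groups : List String → List (List String)
  | [] => []
  | l :: ls =>
    if isDefLine l then
      (l :: ls.takeWhile (fun x => !isDefLine x)) :: groups (ls.dropWhile (fun x => !isDefLine x))
    else groups ls
termination_by xs => xs.length
decreasing_by
  · exact Nat.lt_succ_of_le (List.length_dropWhile_le _ _)
  · simp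

def finishA (st : List (List String) × List String) : List (List String) :=
  if st.2.isEmpty then st.1 else st.1 ++ [st.2]

def startsOf (xs : List String) : List Int :=
  ((PySem.List.enumerate xs).filter (fun p => isDefLine p.2)).map (fun p => p.1)

def slicesOf (xs : List String) (s : List Int) : List (List String) :=
  (s.zip (s.drop 1 ++ [PySem.List.len xs])).map
    (fun p => PySem.List.slice xs (some p.1) (some p.2))

-- ---- A-side ----
theorem foldl_stepA_ne (ls : List String) (ams : List (List String)) (cur : List String)
    (h : cur ≠ []) :
    finishA (ls.foldl stepA (ams, cur)) =
      ams ++ (cur ++ ls.takeWhile (fun x => !isDefLine x)) ::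
        groups (ls.dropWhile (fun x => !isDefLine x)) := by
  induction ls generalizing ams cur with
  | nil => simp [finishA, groups, h]
  | cons l ls ih =>
    by_cases hl : isDefLine l
    · have hst : stepA (ams, cur) l = (ams ++ [cur], [l]) := by
        simp [stepA, hl, h]
      rw [List.foldl_cons, hst, ih _ _ (by simp)]
      simp [groups, hl]
    · have hst : stepA (ams, cur) l = (ams, cur ++ [l]) := by
        simp [stepA, hl, h]
      rw [List.foldl_cons, hst, ih _ _ (by simp [h])]
      simp [hl]

theorem finish_foldl_eq_groups (xs : List String) :
    finishA (xs.foldl stepA ([], [])) = groups xs := by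
  induction xs with
  | nil => simp [finishA, groups]
  | cons l ls ih =>
    by_cases hl : isDefLine l
    · have hst : stepA ([], []) l = ([], [l]) := by simp [stepA, hl]
      rw [List.foldl_cons, hst, foldl_stepA_ne _ _ _ (by simp)]
      simp [groups, hl]
    · have hst : stepA ([], []) l = ([], []) := by simp [stepA, hl]
      rw [List.foldl_cons, hst, ih]
      simp [groups, hl]

theorem A_eq_groups (xs : List String) : collect_methods xs = groups xs := by
  unfold collect_methods
  rw [PySem.List.foldl_pyRange_zero_pyGetD]
  exact finish_foldl_eq_groups xs

-- ---- B-side ----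
theorem enumerate_shift (xs : List String) (s : Int) :
    PySem.List.enumerate xs (s + 1) = (PySem.List.enumerate xs s).map (fun p => (p.1 + 1, p.2)) := by
  induction xs generalizing s with
  | nil => simp [PySem.List.enumerate_nil]
  | cons x xs ih => simp [PySem.List.enumerate_cons, ih]

theorem startsOf_cons (l : String) (ls : List String) :
    startsOf (l :: ls) =
      if isDefLine l then 0 :: (startsOf ls).map (· + 1)
      else (startsOf ls).map (· + 1) := by
  unfold startsOf
  rw [PySem.List.enumerate_cons, enumerate_shift]
  by_cases hl : isDefLine l <;>
    simp [hl, List.filter_map, List.map_map, Function.comp_def]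

theorem startsOf_nonneg (xs : List String) : ∀ i ∈ startsOf xs, 0 ≤ i := by
  induction xs with
  | nil => simp [startsOf]
  | cons l ls ih =>
    intro i hi
    rw [startsOf_cons] at hi
    by_cases hl : isDefLine l
    · rw [if_pos hl] at hi
      rcases List.mem_cons.1 hi with rfl | hm
      · norm_num
      · obtain ⟨j, hj, rfl⟩ := List.mem_map.1 hm
        have := ih j hj; omega
    · rw [if_neg hl] at hi
      obtain ⟨j, hj, rfl⟩ := List.mem_map.1 hi
      have := ih j hj; omega

theorem takeWhile_of_startsOf_nil (xs : List String) (h : startsOf xs = []) :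
    xs.takeWhile (fun x => !isDefLine x) = xs := by
  induction xs with
  | nil => simp
  | cons l ls ih =>
    rw [startsOf_cons] at h
    by_cases hl : isDefLine l
    · rw [if_pos hl] at h; simp at h
    · rw [if_neg hl] at h
      have hnil : startsOf ls = [] := by
        cases hs : startsOf ls with
        | nil => rfl
        | cons a b => rw [hs] at h; simp at h
      rw [List.takeWhile_cons]
      simp [hl, ih hnil]

theorem takeWhile_of_startsOf_cons (xs : List String) (i : Int) (rest : List Int)
    (h : startsOf xs = i :: rest) :
    xs.takeWhile (fun x => !isDefLine x) = xs.take i.toNat := by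
  induction xs generalizing i rest with
  | nil => simp [startsOf] at h
  | cons l ls ih =>
    rw [startsOf_cons] at h
    by_cases hl : isDefLine l
    · rw [if_pos hl] at h
      obtain ⟨h0, -⟩ := List.cons_eq_cons.mp h
      rw [← h0]
      simp [hl]
    · rw [if_neg hl] at h
      cases hs : startsOf ls with
      | nil => rw [hs] at h; simp at h
      | cons j rest' =>
        rw [hs] at h
        simp only [List.map_cons, List.cons.injEq] at h
        obtain ⟨hji, -⟩ := h
        have hj : 0 ≤ j := startsOf_nonneg ls j (by rw [hs]; exact List.mem_cons_self ..)
        rw [← hji, show (j + 1).toNat = j.toNat + 1 by omega]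
        simp [hl, ih j rest' hs]

theorem slicesOf_shift (xs : List String) (l : String) (s : List Int)
    (hs : ∀ i ∈ s, 0 ≤ i) :
    slicesOf (l :: xs) (s.map (· + 1)) = slicesOf xs s := by
  unfold slicesOf
  have h2 : ((s.map (· + 1)).drop 1 ++ [PySem.List.len (l :: xs)]) =
      (s.drop 1 ++ [PySem.List.len xs]).map (· + 1) := by
    simp [PySem.List.len]
  rw [h2, List.zip_map, List.map_map]
  apply List.map_congr_left
  rintro ⟨lo, hi⟩ hmem
  have hlo : 0 ≤ lo := hs lo (List.of_mem_zip hmem).1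
  have hhi : 0 ≤ hi := by
    rcases List.mem_append.1 (List.of_mem_zip hmem).2 with hd | hsing
    · exact hs hi (List.mem_of_mem_drop hd)
    · simp [PySem.List.len] at hsing
      omega
  simp only [Function.comp_apply, Prod.map_apply]
  rw [PySem.List.slice_toNat _ (by omega : (0:Int) ≤ lo + 1) (by omega : (0:Int) ≤ hi + 1),
      PySem.List.slice_toNat _ hlo hhi]
  rw [show (lo + 1).toNat = lo.toNat + 1 by omega, show (hi + 1).toNat = hi.toNat + 1 by omega]
  simp

theorem slicesOf_singleton (xs : List String) (a : Int) :
    slicesOf xs [a] = [PySem.List.slice xs (some a) (some (PySem.List.len xs))] := by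
  simp [slicesOf]

theorem slicesOf_cons_cons (xs : List String) (a b : Int) (t : List Int) :
    slicesOf xs (a :: b :: t) =
      PySem.List.slice xs (some a) (some b) :: slicesOf xs (b :: t) := by
  simp [slicesOf]

theorem groups_dropWhile (xs : List String) :
    groups (xs.dropWhile (fun x => !isDefLine x)) = groups xs := by
  induction xs with
  | nil => simp
  | cons l ls ih =>
    by_cases hl : isDefLine l
    · rw [List.dropWhile_cons]
      simp [hl]
    · rw [List.dropWhile_cons]
      conv_rhs => rw [groups]
      simp [hl, ih]

theorem B_eq_groups (xs : List String) : collect_methods_alt xs = groups xs := by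
  show slicesOf xs (startsOf xs) = groups xs
  induction xs with
  | nil => simp [slicesOf, startsOf, groups, PySem.List.enumerate_nil]
  | cons l ls ih =>
    rw [startsOf_cons]
    by_cases hl : isDefLine l
    · rw [if_pos hl]
      conv_rhs => rw [groups]
      rw [if_pos hl, ← groups_dropWhile ls] at *
      cases hs : startsOf ls with
      | nil =>
        have htake := takeWhile_of_startsOf_nil ls hs
        have hdrop : ls.dropWhile (fun x => !isDefLine x) = [] :=
          List.dropWhile_eq_nil_iff.mpr (List.takeWhile_eq_self_iff.mp htake)
        rw [List.map_nil, slicesOf_singleton, htake, hdrop]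
        rw [PySem.List.slice_toNat _ (by norm_num) (by simp [PySem.List.len]; omega)]
        simp [groups, PySem.List.len]
      | cons jidx rest =>
        have hj : 0 ≤ jidx := startsOf_nonneg ls jidx (by rw [hs]; exact List.mem_cons_self ..)
        have htake := takeWhile_of_startsOf_cons ls jidx rest hs
        rw [List.map_cons, slicesOf_cons_cons,
            show (jidx + 1) :: List.map (fun x => x + 1) rest
                = (jidx :: rest).map (· + 1) from rfl,
            slicesOf_shift ls l _ (by intro i hi; exact startsOf_nonneg ls i (by rw [hs]; exact hi)),
            ← hs, ih]
        rw [PySem.List.slice_toNat _ (by norm_num) (by omega)]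
        rw [show (jidx + 1).toNat = jidx.toNat + 1 by omega]
        rw [htake]
        simp
    · rw [if_neg hl]
      rw [slicesOf_shift ls l _ (startsOf_nonneg ls), ih]
      conv_rhs => rw [groups]
      rw [if_neg hl]

-- ===== VERDICT (by name: the statement is the Claim_ definition above) =====
theorem collect_methods_spec : Claim_equal_collect_methods := by
  intro contents _
  unfold Spec_collect_methods
  rw [A_eq_groups, B_eq_groups]
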